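-- pv_equiv track=rewrite | github.com/SmallDoges/small-doge | src/small_doge/webui/backend/smalldoge_webui/utils/models.py | is_huggingface_model_id
-- ===== SOURCE A (Python) =====
-- def is_huggingface_model_id(model_id: str) -> bool:
--     """
--     Check if a model ID is a HuggingFace model ID (org/model format)
--
--     Args:
--         model_id: Model identifier
--
--     Returns:
--         bool: True if it's a HuggingFace model ID, False if it's a local path
--     """
--     # Count slashes
--     slash_count = model_id.count('/')
--
--     # HuggingFace model IDs have exactly one slash (org/model)
--     if slash_count == 1:
--         # Additional validation: should not start with / or contain backslashes
--         if not model_id.startswith('/') and '\\' not in model_id: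
--             parts = model_id.split('/')
--             # Both parts should be non-empty and not contain special path characters
--             if len(parts) == 2 and all(part.strip() for part in parts):
--                 return True
--
--     return False
-- ===== SOURCE B (Python) =====
-- def is_huggingface_model_id(model_id: str) -> bool:
--     """Single left-to-right scan: count slashes and record whether each side
--     of the (first) slash contains a non-whitespace character; reject on any
--     backslash immediately."""
--     slashes = 0
--     left = False
--     right = False
--     for c in model_id:
--         if c == '\\':
--             return False
--         if c == '/':
--             slashes += 1
--         elif not c.isspace():
--             if slashes == 0:
--                 left = True
--             else:
--                 right = True
--     return slashes == 1 and left and right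
-- ===== Notes on version B (the rewrite author's own statement) =====
-- stated objective: alternative
-- what changed: Replaced the count/startswith/contains/split/strip multi-pass pipeline with a single left-to-right character scan that tracks the slash count and whether each side of the slash has a non-whitespace character, returning False immediately on a backslash.
import Mathlib
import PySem

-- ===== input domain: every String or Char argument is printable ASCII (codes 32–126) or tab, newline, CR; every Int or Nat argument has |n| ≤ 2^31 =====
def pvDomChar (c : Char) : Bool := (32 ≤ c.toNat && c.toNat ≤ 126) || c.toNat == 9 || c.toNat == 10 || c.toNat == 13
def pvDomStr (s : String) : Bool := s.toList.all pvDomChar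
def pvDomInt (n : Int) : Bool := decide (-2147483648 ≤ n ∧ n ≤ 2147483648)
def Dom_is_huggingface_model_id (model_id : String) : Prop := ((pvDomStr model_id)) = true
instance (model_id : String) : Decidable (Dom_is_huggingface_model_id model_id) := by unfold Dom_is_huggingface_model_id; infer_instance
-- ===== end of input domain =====

-- B replaces A's multi-pass count/startswith/contains/split/strip pipeline by one
-- left-to-right scan tracking the slash count and a non-whitespace flag per side (objective: alternative).

-- ===== PORT A =====
def is_huggingface_model_id (model_id : String) : Bool :=
  let slash_count := PySem.Str.count model_id "/"
  if slash_count == 1 then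
    if !(PySem.Str.startswith model_id "/") && !(PySem.Str.isIn "\\" model_id) then
      let parts := (PySem.Str.split? model_id "/").getD []
      if parts.length == 2 && parts.all (fun p => PySem.Str.len (PySem.Str.strip p) != 0) then
        true
      else
        false
    else
      false
  else
    false

-- ===== PORT B =====
-- the scan loop of Source B: state = (slashes so far, non-space seen left of slash, right of slash)
def hfAltLoop : List Char → Nat → Bool → Bool → Bool
  | [], slashes, left, right => slashes == 1 && left && right
  | c :: rest, slashes, left, right =>
    if c = '\\' then false
    else if c = '/' then hfAltLoop rest (slashes + 1) left right
    else if PySem.Chars.isspace c then hfAltLoop rest slashes left right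
    else if slashes == 0 then hfAltLoop rest slashes true right
    else hfAltLoop rest slashes left true

def is_huggingface_model_id_alt (model_id : String) : Bool :=
  hfAltLoop model_id.toList 0 false false

-- ===== PRECONDITION & SPEC =====
def Spec_is_huggingface_model_id (model_id : String) (out : Bool) : Prop := out = is_huggingface_model_id_alt model_id
instance (model_id : String) (out : Bool) : Decidable (Spec_is_huggingface_model_id model_id out) := by unfold Spec_is_huggingface_model_id; infer_instance

-- ===== CLAIM (what is proved, stated in full; the proofs are below) =====
def Claim_equal_is_huggingface_model_id : Prop := ∀ (model_id : String), Dom_is_huggingface_model_id model_id → Spec_is_huggingface_model_id model_id (is_huggingface_model_id model_id)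

-- ===== LEMMAS AND PROOFS =====

-- abbreviation used only by the proofs: "non-space" test
def hfNS (c : Char) : Bool := !PySem.Chars.isspace c

-- rfl-equations for the fuelled helpers of PySem.Chars.count / splitOn at sep = ['/']
theorem hf_countGo_nil (f acc : Nat) : PySem.Chars.count.go ['/'] f [] acc = acc := by
  cases f <;> rfl

theorem hf_countGo_cons (c : Char) (t : List Char) (f acc : Nat) :
    PySem.Chars.count.go ['/'] (f+1) (c::t) acc =
      if (('/' == c) && List.isPrefixOf [] t) = true then PySem.Chars.count.go ['/'] f (List.drop 1 (c::t)) (acc+1)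
      else PySem.Chars.count.go ['/'] f t acc := rfl

theorem hf_splitGo_nil (cur : List Char) (f : Nat) (acc : List (List Char)) :
    PySem.Chars.splitOn.go ['/'] (f+1) [] cur acc = (cur.reverse :: acc).reverse := rfl

theorem hf_splitGo_cons (c : Char) (t cur : List Char) (f : Nat) (acc : List (List Char)) :
    PySem.Chars.splitOn.go ['/'] (f+1) (c::t) cur acc =
      if (('/' == c) && List.isPrefixOf [] t) = true then PySem.Chars.splitOn.go ['/'] f (List.drop 1 (c::t)) [] (cur.reverse :: acc)
      else PySem.Chars.splitOn.go ['/'] f t (c :: cur) acc := rfl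

-- count.go on a single-character needle is List.count
theorem hf_countGo (l : List Char) : ∀ (fuel acc : Nat), l.length ≤ fuel →
    PySem.Chars.count.go ['/'] fuel l acc = acc + l.count '/' := by
  induction l with
  | nil => intro fuel acc _; simp [hf_countGo_nil]
  | cons c t ih =>
    intro fuel acc h
    cases fuel with
    | zero => simp at h
    | succ f =>
      rw [hf_countGo_cons]
      by_cases hc : c = '/'
      · subst hc
        rw [if_pos (by simp)]
        simp only [List.drop_succ_cons, List.drop_zero]
        rw [ih f (acc + 1) (by simpa using h)]
        simp
        omega
      · rw [if_neg (by simp [Ne.symm hc])]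
        rw [ih f acc (by simpa using h)]
        simp [hc]

theorem hf_count (l : List Char) : PySem.Chars.count l ['/'] = l.count '/' := by
  simp [PySem.Chars.count, hf_countGo l l.length 0 le_rfl]

-- structural version of splitOn.go for the single-character separator
def hfSp : List Char → List Char → List (List Char)
  | [], cur => [cur.reverse]
  | c :: t, cur => if c = '/' then cur.reverse :: hfSp t [] else hfSp t (c :: cur)

theorem hf_splitGo (l : List Char) : ∀ (fuel : Nat) (cur : List Char) (acc : List (List Char)),
    l.length < fuel →
    PySem.Chars.splitOn.go ['/'] fuel l cur acc = acc.reverse ++ hfSp l cur := by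
  induction l with
  | nil =>
    intro fuel cur acc h
    cases fuel with
    | zero => omega
    | succ f => simp [hf_splitGo_nil, hfSp]
  | cons c t ih =>
    intro fuel cur acc h
    cases fuel with
    | zero => omega
    | succ f =>
      rw [hf_splitGo_cons]
      by_cases hc : c = '/'
      · subst hc
        rw [if_pos (by simp)]
        simp only [List.drop_succ_cons, List.drop_zero]
        rw [ih f [] (cur.reverse :: acc) (by simpa using h)]
        simp [hfSp]
      · rw [if_neg (by simp [Ne.symm hc])]
        rw [ih f (c :: cur) acc (by simpa using h)]
        simp [hfSp, hc]

theorem hf_splitOn (l : List Char) : PySem.Chars.splitOn l ['/'] = hfSp l [] := by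
  simpa using hf_splitGo l (l.length + 1) [] [] (by omega)

theorem hf_sp_no_slash (l : List Char) : ∀ cur, '/' ∉ l → hfSp l cur = [cur.reverse ++ l] := by
  induction l with
  | nil => intro cur _; simp [hfSp]
  | cons c t ih =>
    intro cur h
    have hc : c ≠ '/' := by simp at h; tauto
    have ht : '/' ∉ t := by simp at h; tauto
    simp [hfSp, hc, ih (c :: cur) ht]

theorem hf_sp_count_one (l : List Char) : ∀ cur, l.count '/' = 1 →
    hfSp l cur = [cur.reverse ++ l.takeWhile (· ≠ '/'), (l.dropWhile (· ≠ '/')).tail] := by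
  induction l with
  | nil => intro cur h; simp at h
  | cons c t ih =>
    intro cur h
    by_cases hc : c = '/'
    · subst hc
      have ht : '/' ∉ t := by
        simp at h
        exact (List.count_eq_zero).1 h
      simp [hfSp, hf_sp_no_slash t [] ht, List.takeWhile, List.dropWhile]
    · have ht : t.count '/' = 1 := by simpa [List.count_cons, hc] using h
      simp [hfSp, hc, ih (c :: cur) ht, List.takeWhile, List.dropWhile]

-- strip is empty iff the string is all whitespace
theorem hf_strip_eq_nil_iff (p : List Char) :
    PySem.Chars.strip p = [] ↔ ∀ c ∈ p, PySem.Chars.isspace c = true := by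
  unfold PySem.Chars.strip PySem.Chars.rstrip PySem.Chars.lstrip
  rw [List.reverse_eq_nil_iff, List.dropWhile_eq_nil_iff]
  constructor
  · intro h c hc
    by_cases hm : c ∈ List.dropWhile PySem.Chars.isspace p
    · exact h c (by simpa using hm)
    · rcases (List.takeWhile_append_dropWhile (p := PySem.Chars.isspace) (l := p)) ▸ hc with _
      have : c ∈ List.takeWhile PySem.Chars.isspace p ∨ c ∈ List.dropWhile PySem.Chars.isspace p := by
        rw [← List.mem_append, List.takeWhile_append_dropWhile]
        exact hc
      rcases this with h1 | h1
      · exact List.mem_takeWhile_imp h1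
      · exact absurd h1 hm
  · intro h c hc
    exact h c ((List.dropWhile_sublist _).subset (by simpa using hc))

-- core characterisations of the scan loop
theorem hf_loop_ge_two (l : List Char) : ∀ k left right, 2 ≤ k → hfAltLoop l k left right = false := by
  induction l with
  | nil => intro k _ _ hk; simp [hfAltLoop]; omega
  | cons c t ih =>
    intro k left right hk
    simp only [hfAltLoop]
    split_ifs <;> first | rfl | exact ih _ _ _ (by omega)

theorem hf_loop_one (l : List Char) : ∀ left right,
    hfAltLoop l 1 left right =
      (!l.contains '\\' && (l.count '/' == 0) && left && (right || l.any hfNS)) := by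
  induction l with
  | nil => intro left right; simp [hfAltLoop]
  | cons c t ih =>
    intro left right
    simp only [hfAltLoop]
    by_cases h1 : c = '\\'
    · subst h1; simp
    · rw [if_neg h1]
      by_cases h2 : c = '/'
      · subst h2
        rw [if_pos rfl, hf_loop_ge_two t 2 left right le_rfl]
        simp
      · rw [if_neg h2]
        by_cases h3 : PySem.Chars.isspace c
        · rw [if_pos h3, ih]
          simp [h2, Ne.symm h1, hfNS, h3]
        · rw [if_neg (by simp [h3]), if_neg (by simp), ih]
          simp [h2, Ne.symm h1, hfNS, h3]

theorem hf_loop_zero (l : List Char) : ∀ left right,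
    hfAltLoop l 0 left right =
      (!l.contains '\\' && (l.count '/' == 1) &&
        (left || (l.takeWhile (· ≠ '/')).any hfNS) &&
        (right || ((l.dropWhile (· ≠ '/')).tail).any hfNS)) := by
  induction l with
  | nil => intro left right; simp [hfAltLoop]
  | cons c t ih =>
    intro left right
    simp only [hfAltLoop]
    by_cases h1 : c = '\\'
    · subst h1; simp
    · rw [if_neg h1]
      by_cases h2 : c = '/'
      · subst h2
        rw [if_pos rfl, hf_loop_one]
        simp [List.takeWhile, List.dropWhile]
      · rw [if_neg h2]
        by_cases h3 : PySem.Chars.isspace c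
        · rw [if_pos h3, ih]
          simp [List.takeWhile, List.dropWhile, h2, Ne.symm h1, hfNS, h3]
        · rw [if_neg (by simp [h3]), if_pos (by simp), ih]
          simp [List.takeWhile, List.dropWhile, h2, Ne.symm h1, hfNS, h3]

theorem hf_singleton_infix (c : Char) (l : List Char) : [c] <:+: l ↔ c ∈ l := by
  constructor
  · intro h; exact h.mem (List.mem_singleton_self c)
  · intro h
    rcases List.mem_iff_append.1 h with ⟨s, t, rfl⟩
    exact ⟨s, t, by simp⟩

theorem hf_strip_len (x : String) :
    (PySem.Str.len (PySem.Str.strip x) != 0) = x.toList.any hfNS := by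
  rw [Bool.eq_iff_iff]
  have hlen : PySem.Str.len (PySem.Str.strip x) = ((PySem.Chars.strip x.toList).length : Int) := by
    rw [PySem.Str.len_eq, PySem.Str.toList_strip]
  rw [hlen]
  simp only [bne_iff_ne, ne_eq, Int.natCast_eq_zero, List.length_eq_zero_iff]
  rw [not_iff_comm, hf_strip_eq_nil_iff]
  simp [hfNS]

theorem hf_isIn_bs (s : String) : PySem.Str.isIn "\\" s = s.toList.contains '\\' := by
  rw [PySem.Str.isIn_eq]
  rw [Bool.eq_iff_iff, PySem.Chars.isIn_iff_infix]
  show ['\\'] <:+: s.toList ↔ _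
  rw [hf_singleton_infix]
  simp

-- ===== VERDICT (by name: the statement is the Claim_ definition above) =====
theorem is_huggingface_model_id_spec : Claim_equal_is_huggingface_model_id := by
  intro s _
  unfold Spec_is_huggingface_model_id is_huggingface_model_id is_huggingface_model_id_alt
  rw [hf_loop_zero]
  have hslash : ("/" : String).toList = ['/'] := rfl
  have hcount : PySem.Str.count s "/" = (s.toList).count '/' := by
    rw [PySem.Str.count_eq, hslash, hf_count]
  by_cases hb : '\\' ∈ s.toList
  · have h2 : s.toList.contains '\\' = true := by simpa using hb
    rw [hf_isIn_bs, h2]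
    simp
  · have h2 : s.toList.contains '\\' = false := by simpa using hb
    rw [hf_isIn_bs, h2]
    by_cases hcnt1 : s.toList.count '/' = 1
    · have hsp : PySem.Chars.split? s.toList ['/'] =
          some [s.toList.takeWhile (· ≠ '/'), (s.toList.dropWhile (· ≠ '/')).tail] := by
        simp [PySem.Chars.split?, hf_splitOn, hf_sp_count_one _ [] hcnt1]
      have hmap := PySem.Str.split?_map s "/"
      rw [hslash, hsp] at hmap
      obtain ⟨a, b, hp, ha, hbl⟩ : ∃ a b, PySem.Str.split? s "/" = some [a, b] ∧
          a.toList = s.toList.takeWhile (· ≠ '/') ∧ b.toList = (s.toList.dropWhile (· ≠ '/')).tail := by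
        cases hq : PySem.Str.split? s "/" with
        | none => rw [hq] at hmap; simp at hmap
        | some ps =>
          rw [hq] at hmap
          simp only [Option.map_some, Option.some.injEq] at hmap
          cases ps with
          | nil => simp at hmap
          | cons a rest =>
            cases rest with
            | nil => simp at hmap
            | cons b rest2 =>
              cases rest2 with
              | nil =>
                simp only [List.map_cons, List.map_nil, List.cons.injEq, and_true] at hmap
                exact ⟨a, b, rfl, hmap.1, hmap.2⟩
              | cons x xs => simp at hmap
      rw [PySem.Str.startswith_eq, hslash]
      cases hl : s.toList with
      | nil => rw [hl] at hcnt1; simp at hcnt1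
      | cons c0 rest =>
        by_cases hc0 : c0 = '/'
        · have hsw : PySem.Chars.startswith (c0 :: rest) ['/'] = true := by
            rw [PySem.Chars.startswith_iff]
            exact List.cons_prefix_cons.mpr ⟨hc0.symm, List.nil_prefix⟩
          rw [hsw]
          have ht1 : ((c0 :: rest).takeWhile (· ≠ '/')).any hfNS = false := by
            simp [List.takeWhile, hc0]
          rw [ht1]
          simp
        · have hsw : PySem.Chars.startswith (c0 :: rest) ['/'] = false := by
            cases hx : PySem.Chars.startswith (c0 :: rest) ['/'] with
            | false => rfl
            | true =>
              have := (PySem.Chars.startswith_iff _ _).1 hx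
              exact absurd (List.cons_prefix_cons.mp this).1.symm hc0
          rw [hsw]
          rw [← hl, hp]
          simp only [hcount, hcnt1, Option.getD_some, List.all_cons, List.all_nil,
            List.length_cons, List.length_nil, hf_strip_len, ha, hbl]
          rw [Bool.eq_iff_iff]
          simp [List.any_eq_true]
    · simp [hf_count, hcnt1]
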